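-- pv_equiv track=rewrite | github.com/vakulnath/schoolride-constraint-mod | src/backends/prompt_tools.py | _parse_ja_verdict
-- ===== SOURCE A (Python) =====
-- def _parse_ja_verdict(text: str):
--     """Parse JA verdict: choice: N|None + jud: explanation.
--
--     Returns (choice_index_or_none, jud) where choice_index is 0-based
--     (i.e. choice:1 → 0, choice:2 → 1, etc.) or None if no valid edit.
--     """
--     choice = None
--     jud = ""
--     for line in text.strip().splitlines():
--         line = line.strip()
--         if line.lower().startswith("choice:"):
--             val = line.split(":", 1)[1].strip().lower()
--             if val == "none":
--                 choice = None
--             else: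
--                 try:
--                     choice = int(val) - 1  # convert 1-based to 0-based
--                 except ValueError:
--                     choice = None
--         elif line.lower().startswith("jud:"):
--             jud = line.split(":", 1)[1].strip()
--     return choice, jud
-- ===== SOURCE B (Python) =====
-- def _parse_ja_verdict(text: str):
--     """Scan lines back-to-front with early exit: grab the last 'choice:' and
--     last 'jud:' lines, then parse them once at the end."""
--     choice_line = None
--     jud_line = None
--     for raw in reversed(text.strip().splitlines()):
--         line = raw.strip()
--         low = line.lower()
--         if choice_line is None and low.startswith("choice:"):
--             choice_line = line
--         if jud_line is None and low.startswith("jud:"):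
--             jud_line = line
--         if choice_line is not None and jud_line is not None:
--             break
--     choice = None
--     if choice_line is not None:
--         val = choice_line.split(":", 1)[1].strip().lower()
--         if val != "none":
--             try:
--                 choice = int(val) - 1
--             except ValueError:
--                 choice = None
--     jud = jud_line.split(":", 1)[1].strip() if jud_line is not None else ""
--     return choice, jud
-- ===== Notes on version B (the rewrite author's own statement) =====
-- stated objective: alternative
-- what changed: Replaces A's forward last-wins accumulator loop (which re-parses every matching line as it goes) by a back-to-front scan with early exit that only records the last choice line and the last jud line and parses each at most once at the end.
import Mathlib
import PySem

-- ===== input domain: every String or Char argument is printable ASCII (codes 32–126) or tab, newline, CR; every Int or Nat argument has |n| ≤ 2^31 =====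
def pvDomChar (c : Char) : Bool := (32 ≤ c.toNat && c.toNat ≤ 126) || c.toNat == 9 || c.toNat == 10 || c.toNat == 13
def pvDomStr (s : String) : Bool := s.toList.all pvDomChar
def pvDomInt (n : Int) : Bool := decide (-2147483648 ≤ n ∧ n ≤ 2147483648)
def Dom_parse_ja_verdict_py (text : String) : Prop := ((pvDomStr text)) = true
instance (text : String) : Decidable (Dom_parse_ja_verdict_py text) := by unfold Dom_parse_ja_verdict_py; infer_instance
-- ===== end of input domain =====

-- B replaces A's forward last-wins line loop by a back-to-front scan with early exit
-- that records the last 'choice:'/'jud:' lines and parses them once at the end (alternative decomposition).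

-- shared line-parsing helpers (the identical expressions occur in both Pythons)
def pvIsChoice (s : List Char) : Bool := PySem.Chars.startswith (PySem.Chars.lower s) "choice:".toList
def pvIsJud (s : List Char) : Bool := PySem.Chars.startswith (PySem.Chars.lower s) "jud:".toList
-- line.split(":", 1)[1] (guarded by the startswith checks, so index 1 exists)
def pvAfterColon (s : List Char) : List Char := (PySem.Chars.splitOnMax s ":".toList 1).getD 1 []
-- val = …strip().lower(); None if "none"; int(val) - 1, ValueError → None
def pvChoiceVal (s : List Char) : Option Int :=
  let val := PySem.Chars.lower (PySem.Chars.strip (pvAfterColon s))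
  if val = "none".toList then none
  else match PySem.Int.ofChars? val with
    | some n => some (n - 1)
    | none => none
def pvJudVal (s : List Char) : List Char := PySem.Chars.strip (pvAfterColon s)

-- ===== PORT A =====
-- loop body: strip the line, then choice:/jud:/other branches updating (choice, jud)
def pvStepA (acc : Option Int × List Char) (line : List Char) : Option Int × List Char :=
  let s := PySem.Chars.strip line
  if pvIsChoice s then (pvChoiceVal s, acc.2)
  else if pvIsJud s then (acc.1, pvJudVal s)
  else acc

def parse_ja_verdict_py (text : String) : Option Int × String :=
  let r := (PySem.Chars.splitlines (PySem.Chars.strip text.toList)).foldl pvStepA (none, [])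
  (r.1, String.ofList r.2)

-- ===== PORT B =====
-- reverse scan with early exit: first matching line of each kind, seen back-to-front
def pvScanB : List (List Char) → Option (List Char) → Option (List Char) →
    Option (List Char) × Option (List Char)
  | [], c, j => (c, j)
  | raw :: rest, c, j =>
    let s := PySem.Chars.strip raw
    let c' := if c.isNone && pvIsChoice s then some s else c
    let j' := if j.isNone && pvIsJud s then some s else j
    if c'.isSome && j'.isSome then (c', j') else pvScanB rest c' j'

def parse_ja_verdict_py_alt (text : String) : Option Int × String :=
  let p := pvScanB ((PySem.Chars.splitlines (PySem.Chars.strip text.toList)).reverse) none none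
  let choice : Option Int := match p.1 with | some s => pvChoiceVal s | none => none
  let jud : List Char := match p.2 with | some s => pvJudVal s | none => []
  (choice, String.ofList jud)

-- ===== PRECONDITION & SPEC =====
def Spec_parse_ja_verdict_py (text : String) (out : Option Int × String) : Prop := out = parse_ja_verdict_py_alt text
instance (text : String) (out : Option Int × String) : Decidable (Spec_parse_ja_verdict_py text out) := by unfold Spec_parse_ja_verdict_py; infer_instance

-- ===== CLAIM (what is proved, stated in full; the proofs are below) =====
def Claim_equal_parse_ja_verdict_py : Prop := ∀ (text : String), Dom_parse_ja_verdict_py text → Spec_parse_ja_verdict_py text (parse_ja_verdict_py text)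

-- ===== LEMMAS AND PROOFS =====

-- the stripped line, if it is a choice:/jud: line
def pvFC (raw : List Char) : Option (List Char) :=
  let s := PySem.Chars.strip raw
  if pvIsChoice s then some s else none
def pvFJ (raw : List Char) : Option (List Char) :=
  let s := PySem.Chars.strip raw
  if pvIsJud s then some s else none

theorem pvFindSome_cons (f : List Char → Option (List Char)) (a : List Char) (l : List (List Char)) :
    List.findSome? f (a :: l) = (f a).or (List.findSome? f l) := by
  cases h : f a <;> simp [h]

theorem pvScanB_eq (ls : List (List Char)) : ∀ (c j : Option (List Char)),
    pvScanB ls c j = (c.or (ls.findSome? pvFC), j.or (ls.findSome? pvFJ)) := by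
  induction ls with
  | nil => intro c j; simp [pvScanB]
  | cons raw rest ih =>
    intro c j
    have hc : (if c.isNone && pvIsChoice (PySem.Chars.strip raw) then some (PySem.Chars.strip raw) else c)
        = c.or (pvFC raw) := by
      cases c <;> simp [pvFC]
    have hj : (if j.isNone && pvIsJud (PySem.Chars.strip raw) then some (PySem.Chars.strip raw) else j)
        = j.or (pvFJ raw) := by
      cases j <;> simp [pvFJ]
    simp only [pvScanB, hc, hj, pvFindSome_cons]
    rw [← Option.or_assoc, ← Option.or_assoc]
    split
    · rename_i h
      simp only [Bool.and_eq_true, Option.isSome_iff_exists] at h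
      obtain ⟨⟨x, hx⟩, ⟨y, hy⟩⟩ := h
      rw [hx, hy]
      simp
    · rw [ih]

theorem pvExcl (s : List Char) (h : pvIsChoice s = true) : pvIsJud s = false := by
  rw [pvIsChoice, PySem.Chars.startswith_iff] at h
  rcases h with ⟨t, ht⟩
  cases hjt : pvIsJud s
  · rfl
  · rw [pvIsJud, PySem.Chars.startswith_iff] at hjt
    rcases hjt with ⟨u, hu⟩
    have e1 : "jud:".toList = ['j', 'u', 'd', ':'] := rfl
    have e2 : "choice:".toList = ['c', 'h', 'o', 'i', 'c', 'e', ':'] := rfl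
    have hh : ("jud:".toList ++ u).head? = ("choice:".toList ++ t).head? := by rw [ht, hu]
    rw [e1, e2] at hh
    simp at hh

theorem pvFoldA_eq (ls : List (List Char)) : ∀ (c0 : Option Int) (j0 : List Char),
    ls.foldl pvStepA (c0, j0)
      = ((match ls.reverse.findSome? pvFC with | some s => pvChoiceVal s | none => c0),
         (match ls.reverse.findSome? pvFJ with | some s => pvJudVal s | none => j0)) := by
  induction ls with
  | nil => intro c0 j0; rfl
  | cons raw rest ih =>
    intro c0 j0
    have hrev : (raw :: rest).reverse = rest.reverse ++ [raw] := by simp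
    have h1 : List.findSome? pvFC [raw] = pvFC raw := by
      rw [pvFindSome_cons]; simp
    have h2 : List.findSome? pvFJ [raw] = pvFJ raw := by
      rw [pvFindSome_cons]; simp
    rw [List.foldl_cons, ih, hrev, List.findSome?_append, List.findSome?_append, h1, h2]
    have hstepc : (pvStepA (c0, j0) raw).1
        = (match pvFC raw with | some s => pvChoiceVal s | none => c0) := by
      simp only [pvStepA, pvFC]
      split
      · rfl
      · split <;> rfl
    have hstepj : (pvStepA (c0, j0) raw).2
        = (match pvFJ raw with | some s => pvJudVal s | none => j0) := by
      simp only [pvStepA, pvFJ]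
      by_cases hch : pvIsChoice (PySem.Chars.strip raw)
      · simp [hch, pvExcl _ hch]
      · simp only [hch, Bool.false_eq_true, if_false]
        split <;> rfl
    cases hfc : rest.reverse.findSome? pvFC <;> cases hfj : rest.reverse.findSome? pvFJ <;>
      simp only [Option.some_or, Option.none_or] <;>
      exact Prod.ext (by first | rfl | exact hstepc) (by first | rfl | exact hstepj)

-- ===== VERDICT (by name: the statement is the Claim_ definition above) =====
theorem parse_ja_verdict_py_spec : Claim_equal_parse_ja_verdict_py := by
  intro text _
  unfold Spec_parse_ja_verdict_py parse_ja_verdict_py parse_ja_verdict_py_alt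
  rw [pvScanB_eq, pvFoldA_eq]
  set L := (PySem.Chars.splitlines (PySem.Chars.strip text.toList)).reverse with hL
  cases L.findSome? pvFC <;> cases L.findSome? pvFJ <;> rfl
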